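-- pv_equiv track=rewrite | github.com/becker94/99-probl-me | 99 probleme/daemon/solution.py | daemon
-- ===== SOURCE A (Python) =====
-- def daemon(numbers, k):
--     if k < 0 or k >= len(numbers):
--         return False
--
--     for i in range(len(numbers)):
--         if i < k and numbers[i] >= numbers[k]:
--             return False
--
--         if i > k and numbers[i] < numbers[k]:
--             return False
--
--     return True
-- ===== SOURCE B (Python) =====
-- def daemon(numbers, k):
--     # Sort-based check: numbers is partitioned at k iff the k smallest elements
--     # (as a multiset) are exactly the prefix numbers[:k], the pivot lands at
--     # position k of the sorted list, and the element just below it is strictly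
--     # smaller than the pivot.
--     if k < 0 or k >= len(numbers):
--         return False
--     s = sorted(numbers)
--     pivot = numbers[k]
--     return (s[k] == pivot
--             and sorted(numbers[:k]) == s[:k]
--             and (k == 0 or s[k - 1] < pivot))
-- ===== Notes on version B (the rewrite author's own statement) =====
-- stated objective: alternative
-- what changed: Replaced the single indexed comparison loop by a sort-based check: sort the list once and verify that sorted(numbers[:k]) equals the first k entries of the sorted list, that the pivot sits at sorted position k, and that its left neighbour there is strictly smaller.
import Mathlib
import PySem

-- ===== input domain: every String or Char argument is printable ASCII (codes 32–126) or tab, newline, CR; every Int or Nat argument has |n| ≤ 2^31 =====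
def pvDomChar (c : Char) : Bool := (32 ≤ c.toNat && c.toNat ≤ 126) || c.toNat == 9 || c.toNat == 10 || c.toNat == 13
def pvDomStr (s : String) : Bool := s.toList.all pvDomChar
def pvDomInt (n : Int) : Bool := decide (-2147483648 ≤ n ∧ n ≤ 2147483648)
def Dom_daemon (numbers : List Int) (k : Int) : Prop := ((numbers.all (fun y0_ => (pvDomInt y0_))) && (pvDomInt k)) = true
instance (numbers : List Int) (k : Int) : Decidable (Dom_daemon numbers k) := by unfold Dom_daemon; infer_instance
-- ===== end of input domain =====

-- B replaces A's index loop by a sort-based check: sort the list once and verify that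
-- the prefix numbers[:k] is exactly the multiset of the k smallest elements, that the
-- pivot sits at position k of the sorted list, and that its left neighbour there is
-- strictly smaller (objective: alternative — O(n log n) instead of O(n), but a genuinely
-- different algorithm).

-- ===== PORT A =====
-- the for-loop with early returns; indices drawn from range(len(numbers)) are always
-- in range, so pyGetD with default 0 is exact here
def daemonLoop (numbers : List Int) (k : Int) : List Int → Bool
  | [] => true
  | i :: rest =>
    if i < k ∧ PySem.List.pyGetD numbers i 0 ≥ PySem.List.pyGetD numbers k 0 then false
    else if i > k ∧ PySem.List.pyGetD numbers i 0 < PySem.List.pyGetD numbers k 0 then false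
    else daemonLoop numbers k rest

def daemon (numbers : List Int) (k : Int) : Bool :=
  if k < 0 ∨ k ≥ (numbers.length : Int) then false
  else daemonLoop numbers k (PySem.List.pyRange 0 (numbers.length : Int) 1)

-- ===== PORT B =====
def daemon_alt (numbers : List Int) (k : Int) : Bool :=
  if k < 0 ∨ k ≥ (numbers.length : Int) then false
  else
    let s := PySem.List.sorted numbers (fun x => x) false
    let pivot := PySem.List.pyGetD numbers k 0   -- k is in range here, exact
    decide (PySem.List.pyGetD s k 0 = pivot) &&
    decide (PySem.List.sorted (PySem.List.slice numbers none (some k)) (fun x => x) false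
            = PySem.List.slice s none (some k)) &&
    (decide (k = 0) || decide (PySem.List.pyGetD s (k - 1) 0 < pivot))

-- ===== PRECONDITION & SPEC =====
def Spec_daemon (numbers : List Int) (k : Int) (out : Bool) : Prop := out = daemon_alt numbers k
instance (numbers : List Int) (k : Int) (out : Bool) : Decidable (Spec_daemon numbers k out) := by unfold Spec_daemon; infer_instance

-- ===== CLAIM (what is proved, stated in full; the proofs are below) =====
def Claim_equal_daemon : Prop := ∀ (numbers : List Int) (k : Int), Dom_daemon numbers k → Spec_daemon numbers k (daemon numbers k)

-- ===== LEMMAS AND PROOFS =====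

-- A's loop over a list of indices is true iff every index passes both checks
theorem daemonLoop_eq_all (numbers : List Int) (k : Int) (is : List Int) :
    daemonLoop numbers k is =
      is.all (fun i =>
        !(decide (i < k ∧ PySem.List.pyGetD numbers i 0 ≥ PySem.List.pyGetD numbers k 0)) &&
        !(decide (i > k ∧ PySem.List.pyGetD numbers i 0 < PySem.List.pyGetD numbers k 0))) := by
  induction is with
  | nil => rfl
  | cons i rest ih =>
    simp only [daemonLoop, List.all_cons]
    by_cases h1 : i < k ∧ PySem.List.pyGetD numbers i 0 ≥ PySem.List.pyGetD numbers k 0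
    · simp [h1]
    · by_cases h2 : i > k ∧ PySem.List.pyGetD numbers i 0 < PySem.List.pyGetD numbers k 0
      · simp [h1, h2]
      · simp [h1, h2, ih]

-- A in predicate form: all of the prefix is < pivot and all of the suffix is ≥ pivot
theorem daemon_char (numbers : List Int) (k : Int) (hk0 : 0 ≤ k) (hkl : k < (numbers.length : Int)) :
    daemon numbers k = true ↔
      ((∀ x ∈ numbers.take k.toNat, x < numbers.getD k.toNat 0) ∧
       (∀ x ∈ numbers.drop (k.toNat + 1), numbers.getD k.toNat 0 ≤ x)) := by
  have hpy : ∀ i : Int, 0 ≤ i → PySem.List.pyGetD numbers i 0 = numbers.getD i.toNat 0 := by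
    intro i hi
    rw [show i = ((i.toNat : Nat) : Int) by omega, PySem.List.pyGetD_natCast, Int.toNat_natCast]
  unfold daemon
  have hnot : ¬ (k < 0 ∨ k ≥ (numbers.length : Int)) := by omega
  rw [if_neg hnot, daemonLoop_eq_all]
  simp only [List.all_eq_true, Bool.and_eq_true,
    Bool.not_eq_true', decide_eq_false_iff_not]
  constructor
  · intro h
    constructor
    · intro x hx
      rw [List.mem_take_iff_getElem] at hx
      obtain ⟨i, hi, hget⟩ := hx
      have hmem : (i : Int) ∈ PySem.List.pyRange 0 (numbers.length : Int) 1 := by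
        rw [PySem.List.mem_pyRange_one]; omega
      obtain ⟨h1, _⟩ := h _ hmem
      by_contra hcon
      push_neg at hcon
      apply h1
      refine ⟨by omega, ?_⟩
      rw [hpy _ (by omega), hpy _ hk0, Int.toNat_natCast,
        List.getD_eq_getElem _ _ (by omega), hget]
      exact hcon
    · intro x hx
      rw [List.mem_drop_iff_getElem] at hx
      obtain ⟨j, hj, hget⟩ := hx
      have hmem : ((k.toNat + 1 + j : Nat) : Int) ∈ PySem.List.pyRange 0 (numbers.length : Int) 1 := by
        rw [PySem.List.mem_pyRange_one]; omega
      obtain ⟨_, h2⟩ := h _ hmem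
      by_contra hcon
      push_neg at hcon
      apply h2
      refine ⟨by omega, ?_⟩
      rw [hpy _ (by omega), hpy _ hk0, Int.toNat_natCast,
        List.getD_eq_getElem _ _ (by omega), hget]
      exact hcon
  · rintro ⟨hleft, hright⟩ i hmem
    rw [PySem.List.mem_pyRange_one] at hmem
    have e2 : numbers.getD k.toNat 0 = numbers[k.toNat]'(by omega) :=
      List.getD_eq_getElem _ _ (by omega)
    constructor
    · rintro ⟨hik, hge⟩
      have hx : numbers[i.toNat]'(by omega) ∈ numbers.take k.toNat := by
        rw [List.mem_take_iff_getElem]; exact ⟨i.toNat, by omega, rfl⟩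
      have h3 := hleft _ hx
      rw [hpy _ (by omega), hpy _ hk0] at hge
      have e1 : numbers.getD i.toNat 0 = numbers[i.toNat]'(by omega) :=
        List.getD_eq_getElem _ _ (by omega)
      omega
    · rintro ⟨hik, hlt⟩
      have heq : k.toNat + 1 + (i.toNat - (k.toNat + 1)) = i.toNat := by omega
      have hx : numbers[k.toNat + 1 + (i.toNat - (k.toNat + 1))]'(by omega) ∈ numbers.drop (k.toNat + 1) := by
        rw [List.mem_drop_iff_getElem]; exact ⟨i.toNat - (k.toNat + 1), by omega, rfl⟩
      have h3 := hright _ hx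
      simp only [heq] at h3
      rw [hpy _ (by omega), hpy _ hk0] at hlt
      have e1 : numbers.getD i.toNat 0 = numbers[i.toNat]'(by omega) :=
        List.getD_eq_getElem _ _ (by omega)
      omega

-- the sort of left ++ p :: right, when everything left is < p ≤ everything right,
-- is sorted(left) ++ sorted(p :: right)
theorem sorted_split (left right : List Int) (p : Int)
    (hl : ∀ x ∈ left, x < p) (hr : ∀ x ∈ right, p ≤ x) :
    PySem.List.sorted (left ++ p :: right) (fun x => x) false =
      PySem.List.sorted left (fun x => x) false ++ PySem.List.sorted (p :: right) (fun x => x) false := by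
  apply PySem.List.sorted_id_eq_of_perm_of_pairwise
  · exact (PySem.List.sorted_perm ..).append (PySem.List.sorted_perm ..)
  · rw [List.pairwise_append]
    refine ⟨PySem.List.sorted_pairwise .., PySem.List.sorted_pairwise .., ?_⟩
    intro a ha b hb
    rw [PySem.List.mem_sorted] at ha hb
    have hb' : p ≤ b := by
      rcases List.mem_cons.mp hb with h | h
      · omega
      · exact hr b h
    have := hl a ha
    omega

-- the head of sorted(p :: right) is p when p ≤ everything in right
theorem sorted_head_pivot (right : List Int) (p : Int) (hr : ∀ x ∈ right, p ≤ x) :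
    ∃ t, PySem.List.sorted (p :: right) (fun x => x) false = p :: t := by
  cases hs : PySem.List.sorted (p :: right) (fun x => x) false with
  | nil => exact absurd ((PySem.List.sorted_eq_nil_iff _ _ _).mp hs) (by simp)
  | cons m t =>
    have hle : m ≤ p := PySem.List.key_head_sorted_le _ _ hs p (by simp)
    have hmem : m ∈ p :: right := by
      rw [← PySem.List.mem_sorted (key := fun x => x) (rev := false), hs]; simp
    have hge : p ≤ m := by
      rcases List.mem_cons.mp hmem with h | h
      · omega
      · exact hr m h
    exact ⟨t, by rw [show m = p by omega]⟩

-- ===== VERDICT (by name: the statement is the Claim_ definition above) =====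
theorem daemon_spec : Claim_equal_daemon := by
  intro numbers k _
  unfold Spec_daemon daemon_alt
  by_cases hk : k < 0 ∨ k ≥ (numbers.length : Int)
  · rw [if_pos hk]
    unfold daemon
    rw [if_pos hk]
  · rw [if_neg hk]
    push_neg at hk
    obtain ⟨hk0, hkl⟩ := hk
    set nk := k.toNat with hnk
    have hkeq : k = ((nk : Nat) : Int) := by omega
    have hnkl : nk < numbers.length := by omega
    set left := numbers.take nk with hleft
    set right := numbers.drop (nk + 1) with hright
    set p := numbers.getD nk 0 with hp
    have hpg : numbers[nk]'hnkl = p := (List.getD_eq_getElem _ _ hnkl).symm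
    have hsplitn : numbers = left ++ p :: right := by
      rw [hleft, hright, ← hpg, List.getElem_cons_drop, List.take_append_drop]
    have hlen : left.length = nk := by rw [hleft]; simp [List.length_take]; omega
    -- rewrite B's primitives into take/drop/getD form
    have hslice1 : PySem.List.slice numbers none (some k) = left := by
      rw [hkeq]; exact PySem.List.slice_to_natCast ..
    have hslen' : (PySem.List.sorted numbers (fun x => x) false).length = numbers.length :=
      PySem.List.length_sorted ..
    set s := PySem.List.sorted numbers (fun x => x) false with hs
    have hslen : s.length = numbers.length := hslen'
    have hslen2 : (PySem.List.sorted numbers (fun x => x) false).length = numbers.length :=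
      PySem.List.length_sorted ..
    have hslice2 : PySem.List.slice s none (some k) = s.take nk := by
      rw [hkeq]; exact PySem.List.slice_to_natCast ..
    have hpy1 : PySem.List.pyGetD numbers k 0 = p := by
      rw [hkeq, PySem.List.pyGetD_natCast]
    have hpy2 : PySem.List.pyGetD s k 0 = s.getD nk 0 := by
      rw [hkeq, PySem.List.pyGetD_natCast]
    simp only [hslice1, hslice2, hpy1, hpy2]
    rw [Bool.eq_iff_iff, daemon_char numbers k hk0 hkl]
    simp only [← hnk, ← hleft, ← hright, ← hp, Bool.and_eq_true, Bool.or_eq_true,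
      decide_eq_true_eq]
    set L := PySem.List.sorted left (fun x => x) false with hL
    have hLlen : L.length = nk := by rw [hL, PySem.List.length_sorted, hlen]
    constructor
    · -- A true ⇒ B true
      rintro ⟨hl, hr⟩
      have hsplit : s = L ++ PySem.List.sorted (p :: right) (fun x => x) false := by
        rw [hs, hL, hsplitn]; exact sorted_split left right p hl hr
      obtain ⟨t, hhead⟩ := sorted_head_pivot right p hr
      refine ⟨⟨?_, ?_⟩, ?_⟩
      · rw [hsplit, hhead, List.getD_append_right _ _ _ _ (by omega), hLlen]
        simp
      · rw [hsplit, ← hLlen, List.take_left]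
      · by_cases h0 : nk = 0
        · left; omega
        · right
          rw [show k - 1 = (((nk - 1 : Nat) : Nat) : Int) by omega, PySem.List.pyGetD_natCast]
          rw [hsplit, List.getD_append _ _ _ _ (by omega)]
          have hm : L.getD (nk - 1) 0 ∈ L := by
            rw [List.getD_eq_getElem _ _ (by omega)]
            exact List.getElem_mem _
          rw [hL, PySem.List.mem_sorted] at hm
          exact hl _ hm
    · -- B true ⇒ A true
      rintro ⟨⟨hpos, hpref⟩, hlast⟩
      have hperm : s.Perm numbers := PySem.List.sorted_perm ..
      have hnks : nk < s.length := by omega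
      constructor
      · -- prefix: every element of left is < p
        intro x hx
        have hx' : x ∈ s.take nk := by
          rw [← hpref, hL, PySem.List.mem_sorted]; exact hx
        rw [List.mem_take_iff_getElem] at hx'
        obtain ⟨i, hi, hget⟩ := hx'
        have h0 : nk ≠ 0 := by omega
        have hlast' : s.getD (nk - 1) 0 < p := by
          rcases hlast with h | h
          · omega
          · rw [show k - 1 = (((nk - 1 : Nat) : Nat) : Int) by omega,
              PySem.List.pyGetD_natCast] at h
            exact h
        have e3 : s.getD (nk - 1) 0 = s[nk - 1]'(by omega) :=
          List.getD_eq_getElem _ _ (by omega)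
        have hmono : s[i]'(by omega) ≤ s[nk - 1]'(by omega) :=
          PySem.List.sorted_id_getElem_mono numbers (by omega) (by omega)
        omega
      · -- suffix: every element of right is ≥ pivot
        intro x hx
        -- p :: right is a permutation of drop nk s (count argument)
        have hcount : ∀ a : Int, (p :: right).count a = (s.drop nk).count a := by
          intro a
          have h1 : numbers.count a = left.count a + (p :: right).count a := by
            conv_lhs => rw [hsplitn]
            simp [List.count_append]
          have h2 : s.count a = (s.take nk).count a + (s.drop nk).count a := by
            conv_lhs => rw [← List.take_append_drop nk s]
            rw [List.count_append]
          have h3 : (s.take nk).count a = left.count a := by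
            rw [← hpref, hL]
            exact (PySem.List.sorted_perm ..).count_eq a
          have h4 : s.count a = numbers.count a := hperm.count_eq a
          omega
        have hpermd : (p :: right).Perm (s.drop nk) := List.perm_iff_count.mpr hcount
        have hx' : x ∈ s.drop nk := hpermd.mem_iff.mp (by simp [hx])
        rw [List.mem_drop_iff_getElem] at hx'
        obtain ⟨j, hj, hget⟩ := hx'
        have e4 : s.getD nk 0 = s[nk]'hnks := List.getD_eq_getElem _ _ hnks
        have hmono : s[nk]'hnks ≤ s[nk + j]'(by omega) :=
          PySem.List.sorted_id_getElem_mono numbers (by omega) (by omega)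
        omega
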